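-- pv_equiv track=rewrite | github.com/nicklanng/aoc23 | day12/part1.py | is_section_count_valid
-- ===== SOURCE A (Python) =====
-- def is_section_count_valid(input, counts):
--     ranges = list(filter(None, input.split('.')))
--     if len(ranges) != len(counts):
--         return False
--     for i, range in enumerate(ranges):
--         if len(range) != counts[i]:
--             return False
--     return True
-- ===== SOURCE B (Python) =====
-- def is_section_count_valid(input, counts):
--     # One pass over the characters: track the current non-'.' run length and an
--     # index into counts; close a run on '.' or at end of string.
--     i = 0
--     run = 0
--     for ch in input:
--         if ch == '.':
--             if run:
--                 if i == len(counts) or counts[i] != run: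
--                     return False
--                 i += 1
--                 run = 0
--         else:
--             run += 1
--     if run:
--         if i == len(counts) or counts[i] != run:
--             return False
--         i += 1
--     return i == len(counts)
-- ===== Notes on version B (the rewrite author's own statement) =====
-- stated objective: simpler
-- what changed: Replaces split('.')+filter+enumerate-indexed comparison loop with a single character scan that maintains the current run length and an index into counts, checking each block as it closes.
import Mathlib
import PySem

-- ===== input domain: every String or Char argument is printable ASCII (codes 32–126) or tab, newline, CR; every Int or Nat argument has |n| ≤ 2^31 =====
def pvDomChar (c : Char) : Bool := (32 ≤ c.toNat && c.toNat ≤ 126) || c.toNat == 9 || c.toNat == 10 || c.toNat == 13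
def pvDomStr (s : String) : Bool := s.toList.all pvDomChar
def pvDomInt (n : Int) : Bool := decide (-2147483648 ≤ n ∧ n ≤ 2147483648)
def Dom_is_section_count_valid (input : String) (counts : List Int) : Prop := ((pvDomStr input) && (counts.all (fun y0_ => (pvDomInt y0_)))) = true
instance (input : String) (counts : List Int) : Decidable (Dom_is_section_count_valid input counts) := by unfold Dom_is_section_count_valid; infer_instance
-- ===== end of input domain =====

-- B replaces split/filter/enumerate with a single character scan (objective: simpler decomposition).

-- ===== PORT A =====
-- for i, range in enumerate(ranges): if len(range) != counts[i]: return False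
-- (counts[i] is always in range here because len(ranges) == len(counts) was checked;
--  pyGetD's default is therefore never the returned value of counts[i])
def pvALoop (counts : List Int) : List (Int × List Char) → Bool
  | [] => true
  | (i, r) :: rest =>
    if ((r.length : Int) ≠ PySem.List.pyGetD counts i 0) then false
    else pvALoop counts rest

def is_section_count_valid (input : String) (counts : List Int) : Bool :=
  -- ranges = list(filter(None, input.split('.')))
  let ranges := (PySem.Chars.splitOn input.toList ['.']).filter (fun r => !r.isEmpty)
  if ranges.length ≠ counts.length then false
  else pvALoop counts (PySem.List.enumerate ranges)

-- ===== PORT B =====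
-- the for-loop of Source B (chars left, index i into counts, current run); the
-- trailing-run check and final 'i == len(counts)' are the [] case
def pvBLoop (counts : List Int) : List Char → Nat → Int → Bool
  | [], i, run =>
    if run ≠ 0 then
      if i = counts.length ∨ counts.getD i 0 ≠ run then false
      else decide (i + 1 = counts.length)
    else decide (i = counts.length)
  | c :: cs, i, run =>
    if c = '.' then
      if run ≠ 0 then
        if i = counts.length ∨ counts.getD i 0 ≠ run then false
        else pvBLoop counts cs (i + 1) 0
      else pvBLoop counts cs i 0
    else pvBLoop counts cs i (run + 1)

def is_section_count_valid_alt (input : String) (counts : List Int) : Bool :=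
  pvBLoop counts input.toList 0 0

-- ===== PRECONDITION & SPEC =====
def Spec_is_section_count_valid (input : String) (counts : List Int) (out : Bool) : Prop := out = is_section_count_valid_alt input counts
instance (input : String) (counts : List Int) (out : Bool) : Decidable (Spec_is_section_count_valid input counts out) := by unfold Spec_is_section_count_valid; infer_instance

-- ===== CLAIM (what is proved, stated in full; the proofs are below) =====
def Claim_equal_is_section_count_valid : Prop := ∀ (input : String) (counts : List Int), Dom_is_section_count_valid input counts → Spec_is_section_count_valid input counts (is_section_count_valid input counts)

-- ===== LEMMAS AND PROOFS =====

-- reference split-on-'.' (s.split('.') for the single-char separator)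
def pvSp : List Char → List (List Char)
  | [] => [[]]
  | c :: cs =>
    if c = '.' then [] :: pvSp cs
    else
      match pvSp cs with
      | [] => [[c]]      -- unreachable: pvSp is never []
      | h :: t => (c :: h) :: t

lemma pvSp_ne_nil (cs : List Char) : pvSp cs ≠ [] := by
  cases cs with
  | nil => simp [pvSp]
  | cons c cs =>
    simp only [pvSp]
    split
    · simp
    · cases h : pvSp cs <;> simp

lemma pvGo_eq : ∀ (fuel : Nat) (l cur : List Char) (acc : List (List Char)),
    l.length < fuel →
    PySem.Chars.splitOn.go ['.'] fuel l cur acc =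
      acc.reverse ++ (cur.reverse ++ (pvSp l).headI) :: (pvSp l).tail := by
  intro fuel
  induction fuel with
  | zero => intro l cur acc h; omega
  | succ fuel ih =>
    intro l cur acc h
    cases l with
    | nil =>
      simp [PySem.Chars.splitOn.go, pvSp]
    | cons c rest =>
      by_cases hc : c = '.'
      · subst hc
        have hpre : List.isPrefixOf ['.'] ('.' :: rest) = true := by
          simp [List.isPrefixOf]
        rw [PySem.Chars.splitOn.go]
        simp only [hpre, if_pos, List.length_cons, List.drop_succ_cons, List.length_nil, List.drop_zero]
        rw [ih rest [] (cur.reverse :: acc) (by simpa using Nat.lt_of_succ_lt_succ h)]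
        have hct : (pvSp rest).headI :: (pvSp rest).tail = pvSp rest := by
          cases hsp : pvSp rest with
          | nil => exact absurd hsp (pvSp_ne_nil rest)
          | cons a t => rfl
        simp [pvSp, hct]
      · have hpre : List.isPrefixOf ['.'] (c :: rest) = false := by
          simp [List.isPrefixOf]
          exact fun hh => hc hh.symm
        rw [PySem.Chars.splitOn.go]
        simp only [hpre, Bool.false_eq_true, if_false]
        rw [ih rest (c :: cur) acc (by simpa using Nat.lt_of_succ_lt_succ h)]
        have := pvSp_ne_nil rest
        cases hsp : pvSp rest with
        | nil => exact absurd hsp this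
        | cons hh tt =>
          simp [pvSp, hc, hsp]

lemma pvSplitOn_eq (cs : List Char) :
    PySem.Chars.splitOn cs ['.'] = pvSp cs := by
  have h := pvGo_eq (cs.length + 1) cs [] [] (by omega)
  have h2 : PySem.Chars.splitOn cs ['.'] = PySem.Chars.splitOn.go ['.'] (cs.length + 1) cs [] [] := rfl
  rw [h2, h]
  have := pvSp_ne_nil cs
  cases hsp : pvSp cs with
  | nil => exact absurd hsp this
  | cons hh tt => simp

-- the block lengths still to be matched, given a pending run
def pvBlocks : List Char → Int → List Int
  | [], run => if run ≠ 0 then [run] else []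
  | c :: cs, run =>
    if c = '.' then (if run ≠ 0 then run :: pvBlocks cs 0 else pvBlocks cs 0)
    else pvBlocks cs (run + 1)

-- lengths of the nonempty pieces
def pvLens (l : List (List Char)) : List Int :=
  (l.filter (fun r => !r.isEmpty)).map (fun r => (r.length : Int))

lemma pvBlocks_sp (cs : List Char) : ∀ (run : Int),
    pvBlocks cs run =
      (if run + ((pvSp cs).headI.length : Int) ≠ 0 then [run + ((pvSp cs).headI.length : Int)] else [])
        ++ pvLens (pvSp cs).tail := by
  induction cs with
  | nil => intro run; simp [pvBlocks, pvSp, pvLens]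
  | cons c cs ih =>
    intro run
    by_cases hc : c = '.'
    · subst hc
      simp only [pvBlocks, pvSp, if_pos rfl, List.headI, List.tail]
      rw [ih 0]
      have hne := pvSp_ne_nil cs
      cases hsp : pvSp cs with
      | nil => exact absurd hsp hne
      | cons hh tt =>
        simp only [hsp, List.headI, List.tail] at *
        by_cases hr : run = 0
        · subst hr
          by_cases hh0 : (hh.length : Int) = 0
          · simp [hh0, pvLens, List.isEmpty_iff, show hh = [] from by
              have : hh.length = 0 := by exact_mod_cast hh0
              simpa using this]
          · have hhne : hh ≠ [] := by
              intro hnil; subst hnil; simp at hh0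
            simp [hh0, pvLens, hhne, List.isEmpty_iff]
        · by_cases hh0 : (hh.length : Int) = 0
          · simp [hh0, hr, pvLens, List.isEmpty_iff, show hh = [] from by
              have : hh.length = 0 := by exact_mod_cast hh0
              simpa using this]
          · have hhne : hh ≠ [] := by
              intro hnil; subst hnil; simp at hh0
            simp [hh0, hr, pvLens, hhne, List.isEmpty_iff]
    · simp only [pvBlocks, pvSp, if_neg hc]
      rw [ih (run + 1)]
      have hne := pvSp_ne_nil cs
      cases hsp : pvSp cs with
      | nil => exact absurd hsp hne
      | cons hh tt =>
        simp only [hsp, List.headI, List.tail]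
        have : run + 1 + (hh.length : Int) = run + (((c :: hh).length : Int)) := by
          simp; ring
        rw [this]

lemma pvBlocks_eq_lens (cs : List Char) :
    pvBlocks cs 0 = pvLens (pvSp cs) := by
  rw [pvBlocks_sp cs 0]
  have hne := pvSp_ne_nil cs
  cases hsp : pvSp cs with
  | nil => exact absurd hsp hne
  | cons hh tt =>
    simp only [List.headI, List.tail]
    by_cases hh0 : (hh.length : Int) = 0
    · have : hh = [] := by
        have : hh.length = 0 := by exact_mod_cast hh0
        simpa using this
      subst this
      simp [pvLens]
    · have hhne : hh ≠ [] := by intro hnil; subst hnil; simp at hh0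
      simp [hh0, pvLens, hhne, List.isEmpty_iff]

-- B's loop decides whether the remaining blocks equal the remaining counts
lemma pvBLoop_eq (counts : List Int) (cs : List Char) : ∀ (i : Nat) (run : Int),
    i ≤ counts.length →
    pvBLoop counts cs i run = decide (pvBlocks cs run = counts.drop i) := by
  induction cs with
  | nil =>
    intro i run hi
    by_cases hr : run = 0
    · subst hr
      simp only [pvBLoop, pvBlocks, ne_eq, not_true_eq_false, reduceIte]
      rcases Nat.lt_or_ge i counts.length with h | h
      · have hne : counts.drop i ≠ [] := by
          simp [List.drop_eq_nil_iff]; omega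
        simp [Nat.ne_of_lt h, hne, eq_comm]
      · have hieq : i = counts.length := le_antisymm hi h
        simp [hieq, List.drop_length]
    · simp only [pvBLoop, pvBlocks, ne_eq, hr, not_false_eq_true, reduceIte]
      rcases Nat.lt_or_ge i counts.length with h | h
      · have hdrop : counts.drop i = counts[i] :: counts.drop (i + 1) :=
          List.drop_eq_getElem_cons h
        have hgetD : counts.getD i 0 = counts[i] := List.getD_eq_getElem counts 0 h
        by_cases he : counts[i] = run
        · have hcond : ¬ (i = counts.length ∨ counts.getD i 0 ≠ run) := by
            push_neg; exact ⟨Nat.ne_of_lt h, by rw [hgetD]; exact he⟩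
          rw [if_neg hcond, hdrop, he, decide_eq_decide]
          constructor
          · intro hh
            have hd : counts.drop (i + 1) = [] := by rw [List.drop_eq_nil_iff]; omega
            rw [hd]
          · intro hh
            injection hh with _ h2
            rw [eq_comm, List.drop_eq_nil_iff] at h2
            omega
        · have hcond : (i = counts.length ∨ counts.getD i 0 ≠ run) := by
            right; rw [hgetD]; exact he
          rw [if_pos hcond]
          symm
          rw [decide_eq_false_iff_not, hdrop]
          intro hh
          exact he (by injection hh with h1 _; exact h1.symm)
      · have hieq : i = counts.length := le_antisymm hi h
        rw [if_pos (Or.inl hieq)]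
        simp [hieq, List.drop_length]
  | cons c cs ih =>
    intro i run hi
    by_cases hc : c = '.'
    · subst hc
      by_cases hr : run = 0
      · subst hr
        simp only [pvBLoop, pvBlocks, reduceIte, ne_eq, not_true_eq_false]
        exact ih i 0 hi
      · simp only [pvBLoop, pvBlocks, reduceIte, ne_eq, hr, not_false_eq_true]
        rcases Nat.lt_or_ge i counts.length with h | h
        · have hdrop : counts.drop i = counts[i] :: counts.drop (i + 1) :=
            List.drop_eq_getElem_cons h
          have hgetD : counts.getD i 0 = counts[i] := List.getD_eq_getElem counts 0 h
          by_cases he : counts[i] = run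
          · have hcond : ¬ (i = counts.length ∨ counts.getD i 0 ≠ run) := by
              push_neg; exact ⟨Nat.ne_of_lt h, by rw [hgetD]; exact he⟩
            rw [if_neg hcond, hdrop, he, ih (i + 1) 0 (by omega), decide_eq_decide]
            constructor
            · intro hh; rw [hh]
            · intro hh; injection hh
          · have hcond : (i = counts.length ∨ counts.getD i 0 ≠ run) := by
              right; rw [hgetD]; exact he
            rw [if_pos hcond]
            symm
            rw [decide_eq_false_iff_not, hdrop]
            intro hh
            exact he (by injection hh with h1 _; exact h1.symm)
        · have hieq : i = counts.length := le_antisymm hi h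
          rw [if_pos (Or.inl hieq)]
          simp [hieq, List.drop_length]
    · simp only [pvBLoop, pvBlocks, if_neg hc]
      exact ih i (run + 1) hi

-- A's loop decides whether the block lengths are a prefix of counts from i on
lemma pvALoop_eq (counts : List Int) (rs : List (List Char))
    (hne : ∀ r ∈ rs, r ≠ []) : ∀ (i : Nat),
    pvALoop counts (PySem.List.enumerate rs (i : Int)) =
      decide ((rs.map (fun r => (r.length : Int))) <+: counts.drop i) := by
  induction rs with
  | nil => intro i; simp [pvALoop, PySem.List.enumerate_nil]
  | cons r rs ih =>
    intro i
    rw [PySem.List.enumerate_cons]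
    simp only [pvALoop, List.map_cons]
    rcases Nat.lt_or_ge i counts.length with h | h
    · have hdrop : counts.drop i = counts[i] :: counts.drop (i + 1) :=
        List.drop_eq_getElem_cons h
      have hget : PySem.List.pyGetD counts (i : Int) 0 = counts[i] := by
        rw [PySem.List.pyGetD_natCast]
        exact List.getD_eq_getElem counts 0 h
      by_cases he : (r.length : Int) = counts[i]
      · rw [if_neg (by rw [hget]; exact fun hh => hh he)]
        have hcast : ((i : Int) + 1) = ((i + 1 : Nat) : Int) := by push_cast; ring
        rw [hcast, ih (fun x hx => hne x (List.mem_cons_of_mem _ hx)) (i + 1), hdrop,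
          decide_eq_decide, List.cons_prefix_cons]
        exact ⟨fun hp => ⟨he, hp⟩, fun hp => hp.2⟩
      · rw [if_pos (by rw [hget]; exact he)]
        symm
        rw [decide_eq_false_iff_not, hdrop, List.cons_prefix_cons]
        exact fun hp => he hp.1
    · have hdrop : counts.drop i = [] := by rw [List.drop_eq_nil_iff]; omega
      have hget : PySem.List.pyGetD counts (i : Int) 0 = 0 := by
        rw [PySem.List.pyGetD_natCast]
        exact List.getD_eq_default counts 0 h
      have hrne : r ≠ [] := hne r (List.mem_cons_self)
      have hrlen : (r.length : Int) ≠ 0 := by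
        simpa [Int.natCast_eq_zero] using fun hh => hrne (List.eq_nil_of_length_eq_zero hh)
      rw [if_pos (by rw [hget]; exact hrlen)]
      symm
      rw [decide_eq_false_iff_not, hdrop]
      intro hp
      simpa using List.eq_nil_of_prefix_nil hp

lemma pvA_eq (input : String) (counts : List Int) :
    is_section_count_valid input counts = decide (pvLens (pvSp input.toList) = counts) := by
  rw [is_section_count_valid]
  simp only [pvSplitOn_eq]
  set rs := (pvSp input.toList).filter (fun r => !r.isEmpty) with hrs
  have hne : ∀ r ∈ rs, r ≠ [] := by
    intro r hr
    rw [hrs] at hr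
    have := (List.mem_filter.mp hr).2
    simpa [List.isEmpty_iff] using this
  have hlens : pvLens (pvSp input.toList) = rs.map (fun r => (r.length : Int)) := by
    simp [pvLens, hrs]
  by_cases hlen : rs.length = counts.length
  · rw [if_neg (by simpa using hlen)]
    have h0 : ((0 : Nat) : Int) = 0 := rfl
    have := pvALoop_eq counts rs hne 0
    rw [h0] at this
    rw [show PySem.List.enumerate rs = PySem.List.enumerate rs (0 : Int) from rfl, this]
    simp only [List.drop_zero, hlens]
    by_cases hpre : (rs.map (fun r => (r.length : Int))) <+: counts
    · have heq : rs.map (fun r => (r.length : Int)) = counts :=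
        List.IsPrefix.eq_of_length hpre (by simpa using hlen)
      simp [hpre, heq]
    · have hneq : rs.map (fun r => (r.length : Int)) ≠ counts := by
        intro hh; exact hpre (hh ▸ List.prefix_refl _)
      simp [hpre, hneq]
  · rw [if_pos (by simpa using hlen)]
    have : pvLens (pvSp input.toList) ≠ counts := by
      rw [hlens]
      intro hh
      apply hlen
      simpa using congrArg List.length hh
    simp [this]

-- ===== VERDICT (by name: the statement is the Claim_ definition above) =====
theorem is_section_count_valid_spec : Claim_equal_is_section_count_valid := by
  intro input counts _
  unfold Spec_is_section_count_valid is_section_count_valid_alt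
  rw [pvA_eq, pvBLoop_eq counts input.toList 0 0 (Nat.zero_le _), pvBlocks_eq_lens]
  simp
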